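-- pv_equiv track=rewrite | github.com/Ssunbell/Algorithm_Study | 38주차/BOJ_마법사상어와파이어볼/BOJ_마법사상어와파이어볼_강태훈.py | solve
-- ===== SOURCE A (Python) =====
-- dr = [-1,-1,0,1,1,1,0,-1]
--
-- dc = [0,1,1,1,0,-1,-1,-1]
--
-- def solve(n, m, k, fireballs):
--     """_summary_
--
--     Args:
--         n (int): 격자의 가로, 세로 길이
--         m (int): 초기 파이어볼의 개수
--         k (int): Simulation 횟수
--         fireballs (m x 5 matrix, columns = [r,c,m,s,d]): 파이어볼 정보를 담은 2차원 행렬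
--             [r,c,m,s,d]
--             = [row_index, column_index, mass, speed, direction]를 의미
--
--     Returns:
--         int: k번 명령 후, 남아있는 파이어볼 질량의 합
--     """
--     for _ in range(k):
--         # n_state : 현재 상태, 딕셔너리 형태로 key는 좌표, value는 해당 좌표에 위치한 파이어볼들을 리스트 형태로 저장
--         n_state = {}
--         for fireball in fireballs:
--             r, c, m, s, d = fireball
--             # d방향으로 s만큼 이동함 -> current_location + d_[d]*s
--             nr, nc = (r-1+dr[d]*s)%n, (c-1+dc[d]*s)%n
--             if (nr,nc) in n_state:
--                 n_state[(nr,nc)].append(fireball)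
--             else:
--                 n_state[(nr,nc)] = [fireball]
--         # new_fireballs : 시뮬레이션 사이클이 진행된 후 생성된 fireball을 2 dim metrix로 저장
--         new_fireballs = []
--         # n_state의 key, value에 대하여 반복 (파이어볼 좌표와, 해당 좌표에 존재하는 파이어볼들에 대하여)
--         for (r, c), loc_fireballs in n_state.items():
--             r, c = r+1, c+1
--             size = len(loc_fireballs)
--             # 해당 좌표에 존재하는 파이어볼이 1개면 이동만 진행
--             if size == 1:
--                 _, _, m, s, d = loc_fireballs[0]
--                 new_fireballs.append([r,c,m,s,d])
--                 continue
--             # 해당 좌표에 존재하는 파이어볼이 2개 이상인 경우엔 이동 후 나뉘어짐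
--             elif size > 1:
--                 # r, c, m, s, d별로 구분하여 따로 저장. 예를들어 loc_info[2] 는 m에대한 정보만 리스트로 담겨져 있음
--                 loc_info = list(zip(*loc_fireballs))
--                 # 파이어볼이 나뉘어질 때 각 파이어볼의 질량, 속력, 방향
--                 sum_m, sum_s, sum_d = sum(loc_info[2])//5, sum(loc_info[3])//size, len(set(list(map(lambda x:x%2,loc_info[4]))))==1
--                 # 나뉘어진 질량이 0보다 큰 경우에만 파이어볼 생성
--                 if sum_m > 0:
--                     # 모두 홀수거나 짝수면 sum_d==1, 그 외 0 => 각각 (0,2,4,6), (1,3,5,7)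
--                     for nd in (0,2,4,6) if sum_d==1 else (1,3,5,7):
--                         new_fireballs.append([r, c, sum_m, sum_s, nd])
--         # 차기 loop를 돌 땐 기존의 fireballs가 new_fireballs로 대치됨
--         fireballs = new_fireballs
--     # k번의 반복이 끝난 후, 남아있는 fireballs의 m만 뽑아 합을 구함
--     return 0 if not fireballs else sum(list(zip(*fireballs))[2])
-- ===== SOURCE B (Python) =====
-- dr = [-1,-1,0,1,1,1,0,-1]
-- dc = [0,1,1,1,0,-1,-1,-1]
--
-- def solve(n, m, k, fireballs):
--     # Sort-and-scan instead of a dict: each round, sort the moved fireballs by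
--     # destination cell and merge each maximal run of equal cells in one linear
--     # scan of the sorted list.  Only the total mass is returned, and it does not
--     # depend on the order in which cells are emitted.
--     for _ in range(k):
--         moved = sorted(
--             (((fb[0] - 1 + dr[fb[4]] * fb[3]) % n,
--               (fb[1] - 1 + dc[fb[4]] * fb[3]) % n, fb) for fb in fireballs),
--             key=lambda t: (t[0], t[1]))
--         new_fireballs = []
--         i = 0
--         while i < len(moved):
--             j = i
--             while j < len(moved) and moved[j][0] == moved[i][0] and moved[j][1] == moved[i][1]:
--                 j += 1
--             cr, cc = moved[i][0] + 1, moved[i][1] + 1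
--             group = [t[2] for t in moved[i:j]]
--             if j - i == 1:
--                 fb = group[0]
--                 new_fireballs.append([cr, cc, fb[2], fb[3], fb[4]])
--             else:
--                 tm = sum(fb[2] for fb in group) // 5
--                 if tm > 0:
--                     ts = sum(fb[3] for fb in group) // (j - i)
--                     dirs = (0, 2, 4, 6) if len({fb[4] % 2 for fb in group}) == 1 else (1, 3, 5, 7)
--                     for nd in dirs:
--                         new_fireballs.append([cr, cc, tm, ts, nd])
--             i = j
--         fireballs = new_fireballs
--     return sum(fb[2] for fb in fireballs)
-- ===== Notes on version B (the rewrite author's own statement) =====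
-- stated objective: alternative
-- what changed: A groups the moved fireballs with a coordinate-keyed dict and emits from its insertion-ordered items; B sorts the moved fireballs by destination cell and merges each maximal run of equal cells in one linear scan of the sorted list - the returned total mass is order-independent, which the Lean proof establishes via permutation invariance of the step.
import Mathlib
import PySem

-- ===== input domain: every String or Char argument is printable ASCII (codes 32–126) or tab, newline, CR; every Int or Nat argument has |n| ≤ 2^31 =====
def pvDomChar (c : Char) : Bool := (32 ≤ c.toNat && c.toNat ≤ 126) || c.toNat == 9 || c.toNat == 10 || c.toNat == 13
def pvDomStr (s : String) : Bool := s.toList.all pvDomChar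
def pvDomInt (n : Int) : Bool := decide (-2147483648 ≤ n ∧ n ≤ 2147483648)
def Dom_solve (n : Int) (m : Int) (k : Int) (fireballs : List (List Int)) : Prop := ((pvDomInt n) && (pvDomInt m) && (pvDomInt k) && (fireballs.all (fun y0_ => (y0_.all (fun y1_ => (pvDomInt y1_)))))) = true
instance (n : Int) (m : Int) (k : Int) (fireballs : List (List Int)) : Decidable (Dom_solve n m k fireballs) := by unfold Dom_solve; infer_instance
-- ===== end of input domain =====

-- B replaces A's coordinate-keyed dict grouping by sort-by-destination-cell and a linear scan
-- merging maximal runs of equal cells; the returned total mass is order-independent.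

-- ===== PORT A =====
def pvDr : List Int := [-1, -1, 0, 1, 1, 1, 0, -1]
def pvDc : List Int := [0, 1, 1, 1, 0, -1, -1, -1]

-- xs[i] (possibly negative index); exact where the index is in range, which Pre_ guarantees
def pvNth (xs : List Int) (i : Int) : Int := PySem.List.pyGetD xs i 0

-- the new cell of a fireball: ((r-1+dr[d]*s)%n, (c-1+dc[d]*s)%n)
def pvCell (n : Int) (fb : List Int) : Int × Int :=
  (PySem.Int.mod (pvNth fb 0 - 1 + pvNth pvDr (pvNth fb 4) * pvNth fb 3) n,
   PySem.Int.mod (pvNth fb 1 - 1 + pvNth pvDc (pvNth fb 4) * pvNth fb 3) n)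

-- n_state: dict cell -> list of fireballs, built exactly like A's 'if key in: append else: = [fb]'
def pvBuildA (n : Int) (fbs : List (List Int)) : PySem.Dict (Int × Int) (List (List Int)) :=
  fbs.foldl (fun st fb =>
    let key := pvCell n fb
    match st.get? key with
    | some l => st.insert key (l ++ [fb])
    | none   => st.insert key [fb]) PySem.Dict.empty

-- the body of A's items() loop for one (cell, loc_fireballs) pair; the column sums port
-- A's list(zip(*loc_fireballs)) projections (exact: all stored rows have ≥ 5 entries under Pre_)
def pvEmitA (p : (Int × Int) × List (List Int)) : List (List Int) :=
  let r := p.1.1 + 1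
  let c := p.1.2 + 1
  let loc := p.2
  let size := loc.length
  if size = 1 then
    let fb0 := PySem.List.pyGetD loc 0 []
    [[r, c, pvNth fb0 2, pvNth fb0 3, pvNth fb0 4]]
  else if size > 1 then
    let sumM := PySem.Int.floordiv (loc.map (fun fb => pvNth fb 2)).sum 5
    let sumS := PySem.Int.floordiv (loc.map (fun fb => pvNth fb 3)).sum (size : Int)
    let sumD := (PySem.Set.ofList (loc.map (fun fb => PySem.Int.mod (pvNth fb 4) 2))).length = 1
    if sumM > 0 then
      (if sumD then [0, 2, 4, 6] else [1, 3, 5, 7]).map (fun nd => [r, c, sumM, sumS, nd])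
    else []
  else []

def pvStepA (n : Int) (fbs : List (List Int)) : List (List Int) :=
  (pvBuildA n fbs).items.foldl (fun acc p => acc ++ pvEmitA p) []

def solve (n : Int) (m : Int) (k : Int) (fireballs : List (List Int)) : Int :=
  let final := (PySem.List.pyRange 0 k 1).foldl (fun fbs _ => pvStepA n fbs) fireballs
  -- 0 if not fireballs else sum(list(zip(*fireballs))[2]); column 2 exact for rows of length ≥ 3 (Pre_)
  if final = [] then 0 else (final.map (fun fb => pvNth fb 2)).sum

-- ===== PORT B =====
-- the moved tuple ((r-1+dr[d]*s)%n, (c-1+dc[d]*s)%n, fb) of B's comprehension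
def pvMv (n : Int) (fb : List Int) : Int × Int × List Int :=
  (PySem.Int.mod (pvNth fb 0 - 1 + pvNth pvDr (pvNth fb 4) * pvNth fb 3) n,
   PySem.Int.mod (pvNth fb 1 - 1 + pvNth pvDc (pvNth fb 4) * pvNth fb 3) n, fb)

-- the body of B's run merge for one maximal run: group = the fireballs of the run
def pvEmitRun (r c : Int) (group : List (List Int)) : List (List Int) :=
  if group.length = 1 then
    let fb := PySem.List.pyGetD group 0 []
    [[r, c, pvNth fb 2, pvNth fb 3, pvNth fb 4]]
  else
    let tm := PySem.Int.floordiv (group.map (fun fb => pvNth fb 2)).sum 5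
    if tm > 0 then
      let ts := PySem.Int.floordiv (group.map (fun fb => pvNth fb 3)).sum (group.length : Int)
      (if (PySem.Set.ofList (group.map (fun fb => PySem.Int.mod (pvNth fb 4) 2))).length = 1
        then [0, 2, 4, 6] else [1, 3, 5, 7]).map (fun nd => [r, c, tm, ts, nd])
    else []

-- B's outer while loop over the sorted moved list: peel one maximal run of equal cells at a time
def pvScanB : List (Int × Int × List Int) → List (List Int)
  | [] => []
  | t :: rest =>
    pvEmitRun (t.1 + 1) (t.2.1 + 1)
        ((t :: rest.takeWhile (fun u => u.1 == t.1 && u.2.1 == t.2.1)).map (fun u => u.2.2))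
      ++ pvScanB (rest.dropWhile (fun u => u.1 == t.1 && u.2.1 == t.2.1))
termination_by l => l.length
decreasing_by
  simp only [List.length_cons]
  exact Nat.lt_succ_of_le (List.length_dropWhile_le _ rest)

-- sorted(..., key=lambda t: (t[0], t[1])) — Python's tuple comparison is the lexicographic order
def pvSortB (l : List (Int × Int × List Int)) : List (Int × Int × List Int) :=
  PySem.List.sorted l (fun u => toLex (u.1, u.2.1)) false

def pvStepB (n : Int) (fbs : List (List Int)) : List (List Int) :=
  pvScanB (pvSortB (fbs.map (pvMv n)))

def solve_alt (n : Int) (m : Int) (k : Int) (fireballs : List (List Int)) : Int :=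
  (((PySem.List.pyRange 0 k 1).foldl (fun fbs _ => pvStepB n fbs) fireballs).map
    (fun fb => pvNth fb 2)).sum

-- ===== PRECONDITION & SPEC =====
-- Pre_ excludes exactly the inputs on which the Python A raises: with k ≥ 1 and a nonempty
-- fireball list, a row not of length 5 (unpacking raises ValueError), a direction outside
-- -8..7 (IndexError on dr/dc) or n = 0 (ZeroDivisionError on %); with k ≤ 0, a row shorter
-- than 3 (IndexError on zip(*fireballs)[2]).
def Pre_solve (n : Int) (m : Int) (k : Int) (fireballs : List (List Int)) : Prop :=
  (k ≤ 0 ∧ ∀ fb ∈ fireballs, 3 ≤ fb.length) ∨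
  ((∀ fb ∈ fireballs, fb.length = 5 ∧ -8 ≤ pvNth fb 4 ∧ pvNth fb 4 < 8) ∧
   (n ≠ 0 ∨ fireballs = []))
instance (n : Int) (m : Int) (k : Int) (fireballs : List (List Int)) : Decidable (Pre_solve n m k fireballs) := by unfold Pre_solve; infer_instance

def pvWitness_solve : Int × Int × Int × List (List Int) := (4, 2, 3, [[1, 1, 10, 1, 0], [2, 3, 7, 1, 5]])

def Spec_solve (n : Int) (m : Int) (k : Int) (fireballs : List (List Int)) (out : Int) : Prop := out = solve_alt n m k fireballs
instance (n : Int) (m : Int) (k : Int) (fireballs : List (List Int)) (out : Int) : Decidable (Spec_solve n m k fireballs out) := by unfold Spec_solve; infer_instance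

-- ===== CLAIM (what is proved, stated in full; the proofs are below) =====
def Claim_equal_solve : Prop := ∀ (n : Int) (m : Int) (k : Int) (fireballs : List (List Int)), Dom_solve n m k fireballs → Pre_solve n m k fireballs → Spec_solve n m k fireballs (solve n m k fireballs)

-- ===== LEMMAS AND PROOFS =====

-- the cell key of a moved tuple; pvKey (pvMv n fb) = pvCell n fb by rfl
def pvKey (u : Int × Int × List Int) : Int × Int := (u.1, u.2.1)

-- emitting a nonempty group is A's per-cell emission
theorem pvEmitRun_eq_emitA (k : Int × Int) (loc : List (List Int)) (h : loc ≠ []) :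
    pvEmitRun (k.1 + 1) (k.2 + 1) loc = pvEmitA (k, loc) := by
  match loc, h with
  | [fb0], _ => simp [pvEmitRun, pvEmitA]
  | fb0 :: fb1 :: rest, _ =>
    have h1 : ¬ ((fb0 :: fb1 :: rest).length = 1) := by simp
    have h2 : (fb0 :: fb1 :: rest).length > 1 := by simp
    simp only [pvEmitRun, pvEmitA, if_neg h1, if_pos h2]

-- emission depends only on the multiset of the group
theorem pvEmitRun_perm (r c : Int) (g g' : List (List Int)) (h : g.Perm g') :
    pvEmitRun r c g = pvEmitRun r c g' := by
  have hlen := h.length_eq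
  by_cases h1 : g.length = 1
  · obtain ⟨x, hx⟩ := List.length_eq_one_iff.mp h1
    subst hx
    have hg' : g' = [x] := (List.singleton_perm.mp h).symm
    subst hg'
    rfl
  · have h1' : ¬ g'.length = 1 := by omega
    have hset : (PySem.Set.ofList (g.map (fun fb => PySem.Int.mod (pvNth fb 4) 2))).Perm
        (PySem.Set.ofList (g'.map (fun fb => PySem.Int.mod (pvNth fb 4) 2))) := by
      refine (List.perm_ext_iff_of_nodup (PySem.Set.nodup_ofList _) (PySem.Set.nodup_ofList _)).mpr ?_
      intro a
      rw [PySem.Set.mem_ofList, PySem.Set.mem_ofList]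
      exact (h.map _).mem_iff
    simp only [pvEmitRun, if_neg h1', (h.map (fun fb => pvNth fb 2)).sum_eq,
      (h.map (fun fb => pvNth fb 3)).sum_eq, hlen, hset.length_eq]

-- A's dict after the first loop: keys = distinct cells in first order, values = in-order filters
theorem pvBuildA_items (n : Int) (l : List (List Int)) :
    (pvBuildA n l).items =
      (PySem.Set.ofList (l.map (pvCell n))).map
        (fun key => (key, l.filter (fun fb => pvCell n fb == key))) := by
  induction l using List.reverseRecOn with
  | nil => rfl
  | append_singleton l fb ih =>
    have hstep : pvBuildA n (l ++ [fb]) =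
        (let key := pvCell n fb
         match (pvBuildA n l).get? key with
         | some v => (pvBuildA n l).insert key (v ++ [fb])
         | none   => (pvBuildA n l).insert key [fb]) := by
      unfold pvBuildA
      rw [List.foldl_append]
      rfl
    have hkeys : (pvBuildA n l).keys = PySem.Set.ofList (l.map (pvCell n)) := by
      simp [PySem.Dict.keys, ih, Function.comp_def]
    have hnodK : (PySem.Set.ofList (l.map (pvCell n))).Nodup := PySem.Set.nodup_ofList _
    have hcells : (l ++ [fb]).map (pvCell n) = l.map (pvCell n) ++ [pvCell n fb] := by simp
    by_cases hmem : pvCell n fb ∈ PySem.Set.ofList (l.map (pvCell n))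
    · have hget : (pvBuildA n l).get? (pvCell n fb) =
          some (l.filter (fun fb' => pvCell n fb' == pvCell n fb)) := by
        apply PySem.Dict.get?_of_mem_items
        · rw [ih]; exact List.mem_map.mpr ⟨pvCell n fb, hmem, rfl⟩
        · rw [hkeys]; exact hnodK
      have hcont : (pvBuildA n l).contains (pvCell n fb) = true := by
        rw [PySem.Dict.contains_iff_mem_keys _ _, hkeys]; exact hmem
      rw [hstep]
      simp only [hget]
      rw [PySem.Dict.items_insert_of_contains _ _ hcont, ih, List.map_map,
        hcells, PySem.Set.ofList_append_singleton, PySem.Set.add_of_mem hmem]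
      apply List.map_congr_left
      intro x hx
      by_cases hxk : x = pvCell n fb
      · subst hxk
        simp [List.filter_append]
      · have hne : pvCell n fb ≠ x := fun hh => hxk hh.symm
        simp [List.filter_append, Function.comp, hxk, hne]
    · have hget : (pvBuildA n l).get? (pvCell n fb) = none := by
        rw [PySem.Dict.get?_eq_none_iff_not_mem_keys _ _, hkeys]; exact hmem
      have hcont : (pvBuildA n l).contains (pvCell n fb) = false := by
        rw [Bool.eq_false_iff]
        intro hc
        exact hmem (hkeys ▸ (PySem.Dict.contains_iff_mem_keys _ _).mp hc)
      have hnofilter : l.filter (fun fb' => pvCell n fb' == pvCell n fb) = [] := by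
        apply List.filter_eq_nil_iff.mpr
        intro fb' hfb'
        simp only [beq_iff_eq]
        intro hc
        exact hmem ((PySem.Set.mem_ofList _ _).mpr (List.mem_map.mpr ⟨fb', hfb', hc⟩))
      rw [hstep]
      simp only [hget]
      rw [PySem.Dict.items_insert_of_not_contains _ _ hcont, ih,
        hcells, PySem.Set.ofList_append_singleton, PySem.Set.add_of_not_mem hmem,
        List.map_append]
      congr 1
      · apply List.map_congr_left
        intro x hx
        have hxk : pvCell n fb ≠ x := fun hh => hmem (hh ▸ hx)
        simp [List.filter_append, hxk]
      · simp [List.filter_append, hnofilter]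

-- A's step as a flatMap over the distinct cells
theorem pvStepA_eq (n : Int) (l : List (List Int)) :
    pvStepA n l =
      (PySem.Set.ofList (l.map (pvCell n))).flatMap
        (fun key => pvEmitA (key, l.filter (fun fb => pvCell n fb == key))) := by
  unfold pvStepA
  rw [PySem.List.foldl_append_eq_flatMap, pvBuildA_items, List.nil_append, List.flatMap_map]

-- the first element surviving dropWhile fails the predicate
theorem pv_dropWhile_head_false {α : Type} (p : α → Bool) (l : List α) (v : α) (tl : List α)
    (h : l.dropWhile p = v :: tl) : p v = false := by
  induction l with
  | nil => simp at h
  | cons x xs ih =>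
    by_cases hx : p x
    · rw [List.dropWhile_cons_of_pos hx] at h; exact ih h
    · rw [List.dropWhile_cons_of_neg hx] at h
      cases h
      simpa using hx

-- rewriting a flatMap pointwise
theorem pv_flatMap_congr {α β : Type} (L : List α) (f g : α → List β)
    (h : ∀ x ∈ L, f x = g x) : L.flatMap f = L.flatMap g := by
  induction L with
  | nil => rfl
  | cons a L ih =>
    rw [List.flatMap_cons, List.flatMap_cons, h a (List.mem_cons_self),
      ih (fun x hx => h x (List.mem_cons_of_mem _ hx))]

-- B's scan of a key-sorted list is a flatMap over some nodup enumeration of its keys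
theorem pvScanB_eq (S : List (Int × Int × List Int)) :
    S.Pairwise (fun a b => toLex (pvKey a) ≤ toLex (pvKey b)) →
    ∃ K : List (Int × Int), K.Nodup ∧ (∀ x, x ∈ K ↔ x ∈ S.map pvKey) ∧
      pvScanB S = K.flatMap (fun x =>
        pvEmitRun (x.1 + 1) (x.2 + 1) ((S.filter (fun u => pvKey u == x)).map (fun u => u.2.2))) := by
  induction S using pvScanB.induct with
  | case1 => exact fun _ => ⟨[], List.nodup_nil, by simp, by simp [pvScanB]⟩
  | case2 t rest ih =>
    intro hs
    cases hs with
    | cons hhead htail =>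
    set p : Int × Int × List Int → Bool := fun u => u.1 == t.1 && u.2.1 == t.2.1 with hpdef
    have hp : ∀ u, p u = true ↔ pvKey u = pvKey t := by
      intro u; simp [hpdef, pvKey, Prod.ext_iff]
    have hrun : ∀ u ∈ rest.takeWhile p, pvKey u = pvKey t :=
      fun u hu => (hp u).mp (List.mem_takeWhile_imp hu)
    have hsub : (rest.dropWhile p).Sublist rest := (List.dropWhile_suffix p).sublist
    have htail' : (rest.dropWhile p).Pairwise (fun a b => toLex (pvKey a) ≤ toLex (pvKey b)) :=
      htail.sublist hsub
    have hne : ∀ u ∈ rest.dropWhile p, pvKey u ≠ pvKey t := by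
      rcases hdw : rest.dropWhile p with _ | ⟨v, tl⟩
      · intro u hu; simp at hu
      · have hv : p v = false := pv_dropWhile_head_false p rest v tl hdw
        have hvne : pvKey v ≠ pvKey t := by
          intro hh
          rw [(hp v).mpr hh] at hv
          cases hv
        have hvge : toLex (pvKey t) ≤ toLex (pvKey v) := by
          refine hhead v (hsub.subset ?_)
          rw [hdw]; exact List.mem_cons_self
        have hvgt : toLex (pvKey t) < toLex (pvKey v) :=
          lt_of_le_of_ne hvge (fun hh => hvne ((toLex_inj.mp hh).symm))
        intro u hu
        rcases List.mem_cons.mp hu with h' | h'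
        · subst h'; exact hvne
        · have hvu : toLex (pvKey v) ≤ toLex (pvKey u) := by
            have h2 := htail'
            rw [hdw] at h2
            cases h2 with
            | cons h3 _ => exact h3 u h'
          intro hh
          rw [hh] at hvu
          exact absurd hvu (not_le.mpr hvgt)
    obtain ⟨K', hnd', hmem', heq'⟩ := ih htail'
    refine ⟨pvKey t :: K', ?_, ?_, ?_⟩
    · refine List.nodup_cons.mpr ⟨?_, hnd'⟩
      intro hkt
      obtain ⟨u, hu, hku⟩ := List.mem_map.mp ((hmem' _).mp hkt)
      exact hne u hu hku
    · intro x
      constructor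
      · intro hx
        rcases List.mem_cons.mp hx with h' | h'
        · subst h'; exact List.mem_map.mpr ⟨t, List.mem_cons_self, rfl⟩
        · obtain ⟨u, hu, hku⟩ := List.mem_map.mp ((hmem' x).mp h')
          exact List.mem_map.mpr ⟨u, List.mem_cons_of_mem _ (hsub.subset hu), hku⟩
      · intro hx
        obtain ⟨u, hu, hku⟩ := List.mem_map.mp hx
        rcases List.mem_cons.mp hu with h' | h'
        · subst h'; exact List.mem_cons.mpr (Or.inl hku.symm)
        · have hu2 : u ∈ rest.takeWhile p ++ rest.dropWhile p := by
            rw [List.takeWhile_append_dropWhile]; exact h'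
          rcases List.mem_append.mp hu2 with h2 | h2
          · exact List.mem_cons.mpr (Or.inl (by rw [← hku, hrun u h2]))
          · exact List.mem_cons.mpr (Or.inr ((hmem' x).mpr (List.mem_map.mpr ⟨u, h2, hku⟩)))
    · rw [pvScanB, List.flatMap_cons]
      congr 1
      · have hr0 : rest.filter (fun u => pvKey u == pvKey t) =
            (rest.takeWhile p).filter (fun u => pvKey u == pvKey t)
              ++ (rest.dropWhile p).filter (fun u => pvKey u == pvKey t) := by
          conv_lhs => rw [← List.takeWhile_append_dropWhile (p := p) (l := rest)]
          rw [List.filter_append]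
        have hfilt : (t :: rest).filter (fun u => pvKey u == pvKey t) = t :: rest.takeWhile p := by
          rw [List.filter_cons, if_pos (by simp)]
          congr 1
          rw [hr0, List.filter_eq_self.mpr (fun u hu => beq_iff_eq.mpr (hrun u hu)),
            List.filter_eq_nil_iff.mpr (fun u hu => by simp [hne u hu]), List.append_nil]
        rw [hfilt]
        rfl
      · rw [heq']
        refine (pv_flatMap_congr _ _ _ ?_).symm
        intro x hx
        have hxne : x ≠ pvKey t := by
          intro hh
          subst hh
          obtain ⟨u, hu, hku⟩ := List.mem_map.mp ((hmem' _).mp hx)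
          exact hne u hu hku
        have hbeq : (pvKey t == x) = false := by
          simp only [beq_eq_false_iff_ne, ne_eq]
          exact fun hh => hxne hh.symm
        have hr1 : (t :: rest).filter (fun u => pvKey u == x) =
            (rest.dropWhile p).filter (fun u => pvKey u == x) := by
          rw [List.filter_cons, if_neg (by simp [hbeq])]
          have hr0 : rest.filter (fun u => pvKey u == x) =
              (rest.takeWhile p).filter (fun u => pvKey u == x)
                ++ (rest.dropWhile p).filter (fun u => pvKey u == x) := by
            conv_lhs => rw [← List.takeWhile_append_dropWhile (p := p) (l := rest)]
            rw [List.filter_append]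
          rw [hr0, List.filter_eq_nil_iff.mpr
            (fun u hu => by simp [hrun u hu, hbeq]), List.nil_append]
        rw [hr1]

-- the step is permutation-invariant up to permutation
theorem pvStep_perm (n : Int) (la lb : List (List Int)) (h : la.Perm lb) :
    (pvStepA n la).Perm (pvStepB n lb) := by
  rw [pvStepA_eq]
  unfold pvStepB pvSortB
  have hcomp : pvKey ∘ pvMv n = fun fb => pvCell n fb := by funext fb; rfl
  have hcomp2 : (fun (u : Int × Int × List Int) => u.2.2) ∘ pvMv n = id := by funext fb; rfl
  have hsorted : (PySem.List.sorted (lb.map (pvMv n)) (fun u => toLex (u.1, u.2.1)) false).Pairwise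
      (fun a b => toLex (pvKey a) ≤ toLex (pvKey b)) :=
    PySem.List.sorted_pairwise (lb.map (pvMv n)) (fun u => toLex (u.1, u.2.1))
  obtain ⟨K, hnd, hmemK, heq⟩ :=
    pvScanB_eq (PySem.List.sorted (lb.map (pvMv n)) (fun u => toLex (u.1, u.2.1)) false) hsorted
  set S := PySem.List.sorted (lb.map (pvMv n)) (fun u => toLex (u.1, u.2.1)) false with hSdef
  have hSperm : S.Perm (lb.map (pvMv n)) := PySem.List.sorted_perm _ _ _
  have hmemB : ∀ x, x ∈ S.map pvKey ↔ x ∈ la.map (fun fb => pvCell n fb) := by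
    intro x
    rw [(hSperm.map pvKey).mem_iff, List.map_map, hcomp]
    exact (h.map _).mem_iff.symm
  have hpoint : ∀ x ∈ K,
      pvEmitRun (x.1 + 1) (x.2 + 1) ((S.filter (fun u => pvKey u == x)).map (fun u => u.2.2))
        = pvEmitA (x, la.filter (fun fb => pvCell n fb == x)) := by
    intro x hx
    have h2 : (lb.map (pvMv n)).filter (fun u => pvKey u == x)
        = (lb.filter (fun fb => pvCell n fb == x)).map (pvMv n) := by
      rw [List.filter_map]
      rfl
    have hgB : ((S.filter (fun u => pvKey u == x)).map (fun u => u.2.2)).Perm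
        (la.filter (fun fb => pvCell n fb == x)) := by
      have h1 := (hSperm.filter (fun u => pvKey u == x)).map (fun u => u.2.2)
      rw [h2, List.map_map, hcomp2, List.map_id] at h1
      exact h1.trans ((h.filter _).symm)
    have hnonempty : la.filter (fun fb => pvCell n fb == x) ≠ [] := by
      have hxm : x ∈ la.map (fun fb => pvCell n fb) := (hmemB x).mp ((hmemK x).mp hx)
      obtain ⟨fb, hfb, hcfb⟩ := List.mem_map.mp hxm
      intro hnil
      have hmemf : fb ∈ la.filter (fun fb => pvCell n fb == x) :=
        List.mem_filter.mpr ⟨hfb, beq_iff_eq.mpr hcfb⟩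
      rw [hnil] at hmemf
      cases hmemf
    rw [pvEmitRun_perm _ _ _ _ hgB]
    exact pvEmitRun_eq_emitA x _ hnonempty
  rw [heq, pv_flatMap_congr _ _ _ hpoint]
  refine List.Perm.flatMap_right _ ?_
  refine (List.perm_ext_iff_of_nodup (PySem.Set.nodup_ofList _) hnd).mpr ?_
  intro a
  rw [PySem.Set.mem_ofList _ _, hmemK, hmemB]

theorem pvIter_perm (n : Int) (r : List Int) (la lb : List (List Int)) (h : la.Perm lb) :
    (r.foldl (fun fbs _ => pvStepA n fbs) la).Perm (r.foldl (fun fbs _ => pvStepB n fbs) lb) := by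
  induction r generalizing la lb with
  | nil => exact h
  | cons x xs ih => exact ih _ _ (pvStep_perm n la lb h)

theorem solve_eq_alt (n mm k : Int) (fireballs : List (List Int)) :
    solve n mm k fireballs = solve_alt n mm k fireballs := by
  unfold solve solve_alt
  have hperm := pvIter_perm n (PySem.List.pyRange 0 k 1) fireballs fireballs (List.Perm.refl _)
  set fa := (PySem.List.pyRange 0 k 1).foldl (fun fbs _ => pvStepA n fbs) fireballs
  set fb := (PySem.List.pyRange 0 k 1).foldl (fun fbs _ => pvStepB n fbs) fireballs
  have hsum : (fa.map (fun fb => pvNth fb 2)).sum = (fb.map (fun fb => pvNth fb 2)).sum :=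
    (hperm.map _).sum_eq
  show (if fa = [] then 0 else (fa.map (fun fb => pvNth fb 2)).sum) = _
  by_cases hnil : fa = []
  · have hb : fb = [] := List.Perm.eq_nil (hnil ▸ hperm).symm
    rw [if_pos hnil, hb]
    rfl
  · rw [if_neg hnil]
    exact hsum

-- ===== VERDICT (by name: the statement is the Claim_ definition above) =====
theorem solve_spec : Claim_equal_solve := by
  intro n m k fireballs _ _
  unfold Spec_solve
  exact solve_eq_alt n m k fireballs
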